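-- pv_equiv track=rewrite | github.com/ymyke/cardio | cardio/agent_damage_state.py | count_equal_items_at_end
-- ===== SOURCE A (Python) =====
-- def count_equal_items_at_end(lst) -> int:
--     if not lst:
--         return 0
--     last_value = lst[-1]
--     count = 1
--     for value in reversed(lst[:-1]):
--         if value == last_value:
--             count += 1
--         else:
--             break
--     return count
-- ===== SOURCE B (Python) =====
-- def count_equal_items_at_end(lst) -> int:
--     # Single forward pass: maintain the length of the current run of
--     # consecutive equal elements; the final run length is the answer.
--     run = 0
--     prev = None
--     for v in lst:
--         run = run + 1 if run and v == prev else 1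
--         prev = v
--     return run
-- ===== Notes on version B (the rewrite author's own statement) =====
-- stated objective: alternative
-- what changed: Replaced the reverse scan with early break (after copying lst[:-1]) by a single forward run-length pass that keeps the current run length and previous element and returns the final run length.
import Mathlib
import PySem

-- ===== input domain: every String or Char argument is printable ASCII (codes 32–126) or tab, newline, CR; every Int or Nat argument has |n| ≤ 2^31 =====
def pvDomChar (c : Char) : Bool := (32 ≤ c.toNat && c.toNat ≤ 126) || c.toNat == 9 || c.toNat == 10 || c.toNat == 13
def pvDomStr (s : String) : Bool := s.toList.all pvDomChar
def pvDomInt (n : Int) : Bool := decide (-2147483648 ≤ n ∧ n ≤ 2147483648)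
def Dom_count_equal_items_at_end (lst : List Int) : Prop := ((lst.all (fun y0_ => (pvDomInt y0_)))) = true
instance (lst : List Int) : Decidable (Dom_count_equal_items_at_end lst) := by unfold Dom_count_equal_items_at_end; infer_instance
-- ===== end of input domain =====

-- B replaces A's reverse scan with early break by a single forward run-length pass (alternative decomposition, same cost).


-- ===== PORT A =====
-- the 'for value in …: if value == last_value: count += 1 else: break' loop
def pvLoopA (last_value : Int) : List Int → Int → Int
  | [], count => count
  | v :: rest, count => if v = last_value then pvLoopA last_value rest (count + 1) else count

def count_equal_items_at_end (lst : List Int) : Int :=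
  match lst with
  | [] => 0
  | _ =>
    let last_value := PySem.List.pyGetD lst (-1) 0   -- lst[-1]; in range since lst ≠ []
    pvLoopA last_value ((PySem.List.slice lst none (some (-1))).reverse) 1

-- ===== PORT B =====
def count_equal_items_at_end_alt (lst : List Int) : Int :=
  (lst.foldl (fun (s : Int × Option Int) v =>
      (if s.1 ≠ 0 ∧ s.2 = some v then s.1 + 1 else 1, some v)) (0, none)).1

-- ===== PRECONDITION & SPEC =====
def Spec_count_equal_items_at_end (lst : List Int) (out : Int) : Prop := out = count_equal_items_at_end_alt lst
instance (lst : List Int) (out : Int) : Decidable (Spec_count_equal_items_at_end lst out) := by unfold Spec_count_equal_items_at_end; infer_instance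

-- ===== CLAIM (what is proved, stated in full; the proofs are below) =====
def Claim_equal_count_equal_items_at_end : Prop := ∀ (lst : List Int), Dom_count_equal_items_at_end lst → Spec_count_equal_items_at_end lst (count_equal_items_at_end lst)

-- ===== LEMMAS AND PROOFS =====

-- length of the trailing run, computed on the REVERSED list
def pvTailRunRev : List Int → Int
  | [] => 0
  | x :: rest => 1 + ((rest.takeWhile (fun v => v = x)).length : Int)

theorem pvLoopA_eq (last : Int) (l : List Int) (c : Int) :
    pvLoopA last l c = c + ((l.takeWhile (fun v => v = last)).length : Int) := by
  induction l generalizing c with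
  | nil => simp [pvLoopA]
  | cons v rest ih =>
    by_cases h : v = last
    · simp [pvLoopA, h, ih]; ring
    · simp [pvLoopA, h]

theorem pvA_eq (lst : List Int) :
    count_equal_items_at_end lst = pvTailRunRev lst.reverse := by
  cases h : lst with
  | nil => simp [count_equal_items_at_end, pvTailRunRev]
  | cons a xs =>
    have hne : lst ≠ [] := by simp [h]
    have hrev : lst.reverse = lst.getLast hne :: lst.dropLast.reverse := by
      conv_lhs => rw [← List.dropLast_append_getLast hne]
      simp
    subst h
    simp only [count_equal_items_at_end, PySem.List.pyGetD_neg_one _ _ hne,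
      PySem.List.slice_to_neg_one, pvLoopA_eq, hrev, pvTailRunRev]

theorem pvB_inv (xs : List Int) :
    xs.foldl (fun (s : Int × Option Int) v =>
      (if s.1 ≠ 0 ∧ s.2 = some v then s.1 + 1 else 1, some v)) (0, none)
    = (pvTailRunRev xs.reverse, xs.getLast?) := by
  induction xs using List.reverseRecOn with
  | nil => simp [pvTailRunRev]
  | append_singleton ys y ih =>
    rw [List.foldl_append, ih]
    simp only [List.foldl_cons, List.foldl_nil, List.reverse_append, List.reverse_cons,
      List.reverse_nil, List.nil_append, List.cons_append, List.getLast?_concat]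
    cases hys : ys.reverse with
    | nil =>
      have : ys = [] := by simpa using congrArg List.reverse hys
      subst this
      simp [pvTailRunRev]
    | cons z rest =>
      have hlast : ys.getLast? = some z := by
        rw [← List.head?_reverse, hys]; rfl
      rw [hlast]
      by_cases hzy : z = y
      · subst hzy
        simp only [pvTailRunRev, List.takeWhile, decide_true]
        simp only [Prod.mk.injEq, and_true, List.length_cons]
        split_ifs with h0 <;> push_cast <;> omega
      · simp only [pvTailRunRev, List.takeWhile]
        simp [hzy]

-- ===== VERDICT (by name: the statement is the Claim_ definition above) =====
theorem count_equal_items_at_end_spec : Claim_equal_count_equal_items_at_end := by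
  intro lst _
  unfold Spec_count_equal_items_at_end count_equal_items_at_end_alt
  rw [pvB_inv, pvA_eq]
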